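-- pv_equiv track=rewrite | github.com/hamas22/Graph-Coloring-AI | Backtracking.py | force_assign_with_conflicts
-- ===== SOURCE A (Python) =====
-- def force_assign_with_conflicts(graph, m, steps):
--     n = len(graph)
--     assignment = [-1] * n
--     for node in range(n):
--         best_color = 0
--         min_conflicts = float('inf')
--
--         for color in range(m):
--             current_conflicts = 0
--             for neighbor in range(n):
--                 if graph[node][neighbor] == 1 and assignment[neighbor] == color:
--                     current_conflicts += 1
--
--             if current_conflicts < min_conflicts:
--                 min_conflicts = current_conflicts
--                 best_color = color
--
--         assignment[node] = best_color
--         steps.append(assignment.copy())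
--
--     return assignment
-- ===== SOURCE B (Python) =====
-- def force_assign_with_conflicts(graph, m, steps):
--     # Faster: one tally pass per node (O(n^2 + n*m)) instead of rescanning
--     # all neighbors for every color (O(n^2 * m)); same result and same
--     # appends to `steps` (mutation of `steps` is preserved).
--     assignment = [-1] * len(graph)
--     for node, row in enumerate(graph):
--         counts = [0] * m
--         for edge, c in zip(row, assignment):
--             if edge == 1 and 0 <= c < m:
--                 counts[c] += 1
--         assignment[node] = min(range(m), key=counts.__getitem__, default=0)
--         steps.append(list(assignment))
--     return assignment
-- ===== Notes on version B (the rewrite author's own statement) =====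
-- stated objective: faster
-- what changed: Instead of rescanning all n neighbors once per candidate color (A's O(n^2*m)), B makes one tally pass per node over zip(row, assignment) into a size-m count array and then picks the first minimal color with min(range(m), key=..., default=0), giving O(n^2 + n*m); both mutate steps identically.
import Mathlib
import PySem

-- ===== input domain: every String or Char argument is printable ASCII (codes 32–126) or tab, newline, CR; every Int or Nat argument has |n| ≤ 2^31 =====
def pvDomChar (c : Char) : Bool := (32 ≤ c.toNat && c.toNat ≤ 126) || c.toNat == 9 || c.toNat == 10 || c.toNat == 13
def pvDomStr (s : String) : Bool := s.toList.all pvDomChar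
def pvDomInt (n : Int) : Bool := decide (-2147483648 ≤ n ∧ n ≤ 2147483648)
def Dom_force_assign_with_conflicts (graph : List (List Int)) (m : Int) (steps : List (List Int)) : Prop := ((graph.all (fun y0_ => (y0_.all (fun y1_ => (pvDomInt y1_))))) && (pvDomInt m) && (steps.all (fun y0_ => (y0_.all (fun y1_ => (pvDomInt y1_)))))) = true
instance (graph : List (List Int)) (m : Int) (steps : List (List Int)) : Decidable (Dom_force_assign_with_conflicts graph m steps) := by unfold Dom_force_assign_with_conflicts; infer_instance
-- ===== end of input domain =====

-- B replaces A's per-color rescans of all neighbors by one tally pass per node into a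
-- size-m count array plus a first-minimum pick (objective: faster).  Both A and B append
-- each intermediate assignment to `steps` in Python; the equivalence proved here is about
-- the RETURN value (the mutation of `steps` is identical in both and not modelled).

-- ===== PORT A =====
-- body of A's `for color in range(m)` loop; state = (best_color, min_conflicts),
-- min_conflicts = float('inf') is modelled as `none`; `cnt color` is the inner
-- `for neighbor in range(n)` conflict-counting loop, passed in by the caller
def aColorStep (cnt : Int → Int) (st : Int × Option Int) (color : Int) : Int × Option Int :=
  let current : Int := cnt color
  match st.2 with
  | none => (color, some current)
  | some mc => if current < mc then (color, some current) else st

def force_assign_with_conflicts (graph : List (List Int)) (m : Int) (steps : List (List Int)) : List Int :=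
  let n := graph.length
  (List.range n).foldl (fun assignment node =>
    let res := (PySem.List.pyRange 0 m 1).foldl (aColorStep (fun color =>
      (List.range n).foldl (fun cc neighbor =>
        if ((graph.getD node []).getD neighbor 0 == 1 && assignment.getD neighbor 0 == color)
        then cc + 1 else cc) 0)) ((0, none) : Int × Option Int)
    assignment.set node res.1) (List.replicate n (-1))

-- ===== PORT B =====
def force_assign_with_conflicts_alt (graph : List (List Int)) (m : Int) (steps : List (List Int)) : List Int :=
  (PySem.List.enumerate graph).foldl (fun assignment p =>
    let counts := (p.2.zip assignment).foldl (fun cnts (q : Int × Int) =>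
      if (q.1 == 1 && decide (0 ≤ q.2) && decide (q.2 < m))
      then cnts.set q.2.toNat (cnts.getD q.2.toNat 0 + 1) else cnts)
      (List.replicate m.toNat (0 : Int))
    let best := PySem.List.minD (PySem.List.pyRange 0 m 1) (fun c => counts.getD c.toNat 0) 0
    PySem.List.pySetD assignment p.1 best) (List.replicate graph.length (-1))

-- ===== PRECONDITION & SPEC =====
-- Pre_ excludes exactly the inputs where A raises IndexError: when m ≥ 1 the inner loop
-- reads graph[node][neighbor] for every neighbor < n, so every row must have length ≥ n.
def Pre_force_assign_with_conflicts (graph : List (List Int)) (m : Int) (steps : List (List Int)) : Prop :=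
  m ≤ 0 ∨ ∀ row ∈ graph, graph.length ≤ row.length
instance (graph : List (List Int)) (m : Int) (steps : List (List Int)) : Decidable (Pre_force_assign_with_conflicts graph m steps) := by unfold Pre_force_assign_with_conflicts; infer_instance

def pvWitness_force_assign_with_conflicts : List (List Int) × Int × List (List Int) :=
  ([[0, 1, 1], [1, 0, 0], [1, 0, 0]], 2, [])

def Spec_force_assign_with_conflicts (graph : List (List Int)) (m : Int) (steps : List (List Int)) (out : List Int) : Prop := out = force_assign_with_conflicts_alt graph m steps
instance (graph : List (List Int)) (m : Int) (steps : List (List Int)) (out : List Int) : Decidable (Spec_force_assign_with_conflicts graph m steps out) := by unfold Spec_force_assign_with_conflicts; infer_instance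

-- ===== CLAIM (what is proved, stated in full; the proofs are below) =====
def Claim_equal_force_assign_with_conflicts : Prop := ∀ (graph : List (List Int)) (m : Int) (steps : List (List Int)), Dom_force_assign_with_conflicts graph m steps → Pre_force_assign_with_conflicts graph m steps → Spec_force_assign_with_conflicts graph m steps (force_assign_with_conflicts graph m steps)

-- ===== LEMMAS AND PROOFS =====

-- fold congruence under an invariant on the accumulator
theorem pvFoldlInvCongr {α σ : Type} (l : List α) (f g : σ → α → σ) (P : σ → Prop)
    (hfg : ∀ s x, x ∈ l → P s → f s x = g s x)
    (hf : ∀ s x, x ∈ l → P s → P (f s x)) :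
    ∀ s, P s → l.foldl f s = l.foldl g s := by
  induction l with
  | nil => intro s _; rfl
  | cons a t ih =>
    intro s hs
    simp only [List.foldl_cons]
    rw [hfg s a (List.mem_cons_self) hs]
    exact ih (fun s x hx => hfg s x (List.mem_cons_of_mem a hx))
      (fun s x hx => hf s x (List.mem_cons_of_mem a hx)) (g s a)
      (hfg s a List.mem_cons_self hs ▸ hf s a List.mem_cons_self hs)

-- min? of a nonempty list is the plain running-argmin fold from its head
theorem pvMinQCons (key : Int → Int) :
    ∀ (t : List Int) (b : Int),
      PySem.List.min? (b :: t) key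
      = some (t.foldl (fun bb x => if key x < key bb then x else bb) b) := by
  intro t
  induction t with
  | nil => intro b; rfl
  | cons c t ih =>
    intro b
    have h1 : PySem.List.min? (b :: c :: t) key
        = PySem.List.min? ((if key c < key b then c else b) :: t) key := by
      simp only [PySem.List.min?, List.foldl_cons]
      by_cases h : key c < key b <;> simp [h]
    rw [h1, ih, List.foldl_cons]

-- A's (best, Option min) fold from (b, some (key b)) is the same plain argmin fold
theorem pvAFoldEq (key : Int → Int) :
    ∀ (cs : List Int) (b : Int),
      cs.foldl (aColorStep key) (b, some (key b))
      = (cs.foldl (fun bb c => if key c < key bb then c else bb) b,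
         some (key (cs.foldl (fun bb c => if key c < key bb then c else bb) b))) := by
  intro cs
  induction cs with
  | nil => intro b; rfl
  | cons c t ih =>
    intro b
    simp only [List.foldl_cons, aColorStep]
    by_cases h : key c < key b <;> simp [h, ih]

-- A's color loop computes exactly minD of the same key over range(m)
theorem pvArgminEq (m : Int) (key : Int → Int) :
    ((PySem.List.pyRange 0 m 1).foldl (aColorStep key) (0, none)).1
    = PySem.List.minD (PySem.List.pyRange 0 m 1) key 0 := by
  by_cases hm : m ≤ 0
  · rw [PySem.List.pyRange_one_eq_nil hm]
    simp [PySem.List.minD, PySem.List.min?]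
  · rw [PySem.List.pyRange_one_cons (by omega : (0:Int) < m)]
    rw [PySem.List.minD, pvMinQCons key]
    rw [List.foldl_cons, show aColorStep key (0, none) 0 = (0, some (key 0)) from rfl]
    rw [pvAFoldEq key]
    rfl

-- the plain argmin fold only depends on key values at the initial point and members
theorem pvPlainFoldCongr (k1 k2 : Int → Int) :
    ∀ (cs : List Int) (b : Int), (∀ x ∈ cs, k1 x = k2 x) → k1 b = k2 b →
      cs.foldl (fun bb c => if k1 c < k1 bb then c else bb) b
      = cs.foldl (fun bb c => if k2 c < k2 bb then c else bb) b := by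
  intro cs
  induction cs with
  | nil => intro b _ _; rfl
  | cons c t ih =>
    intro b hmem hb
    simp only [List.foldl_cons]
    have hc : k1 c = k2 c := hmem c List.mem_cons_self
    rw [hc, hb]
    by_cases h : k2 c < k2 b <;> simp only [h, if_true, if_false] <;>
      exact ih _ (fun x hx => hmem x (List.mem_cons_of_mem c hx)) (by simp [hc, hb])
  
theorem pvMinDCongr (cs : List Int) (k1 k2 : Int → Int) (d : Int)
    (h : ∀ x ∈ cs, k1 x = k2 x) :
    PySem.List.minD cs k1 d = PySem.List.minD cs k2 d := by
  cases cs with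
  | nil => rfl
  | cons c t =>
    simp only [PySem.List.minD]
    rw [pvMinQCons k1, pvMinQCons k2,
        pvPlainFoldCongr k1 k2 t c (fun x hx => h x (List.mem_cons_of_mem c hx))
          (h c List.mem_cons_self)]

-- reading one cell of the tally after the tally pass
theorem pvTallyGetD (m : Int) :
    ∀ (ps : List (Int × Int)) (counts : List Int) (k : Nat),
      k < counts.length → counts.length = m.toNat →
      (ps.foldl (fun cnts (q : Int × Int) =>
          if (q.1 == 1 && decide (0 ≤ q.2) && decide (q.2 < m))
          then cnts.set q.2.toNat (cnts.getD q.2.toNat 0 + 1) else cnts) counts).getD k 0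
      = counts.getD k 0
        + (ps.countP (fun q => q.1 == 1 && decide (0 ≤ q.2) && decide (q.2 < m) && (q.2.toNat == k)) : Int) := by
  intro ps
  induction ps with
  | nil => intro counts k hk hm; simp
  | cons q t ih =>
    intro counts k hk hm
    simp only [List.foldl_cons, List.countP_cons]
    by_cases hg : (q.1 == 1 && decide (0 ≤ q.2) && decide (q.2 < m)) = true
    · have hq2 : 0 ≤ q.2 ∧ q.2 < m := by
        simp only [Bool.and_eq_true, decide_eq_true_eq] at hg; exact ⟨hg.1.2, hg.2⟩
      have hqlt : q.2.toNat < counts.length := by omega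
      rw [if_pos hg]
      rw [ih (counts.set q.2.toNat (counts.getD q.2.toNat 0 + 1)) k (by simpa using hk) (by simpa using hm)]
      have hset : (counts.set q.2.toNat (counts.getD q.2.toNat 0 + 1)).getD k 0
          = if q.2.toNat = k then counts.getD k 0 + 1 else counts.getD k 0 := by
        rw [List.getD_eq_getElem _ _ (by simpa using hk), List.getElem_set,
            List.getD_eq_getElem _ _ hk]
        by_cases he : q.2.toNat = k
        · rw [if_pos he, if_pos he, he, List.getD_eq_getElem _ _ hk]
        · rw [if_neg he, if_neg he]
      rw [hset]
      by_cases he : q.2.toNat = k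
      · simp [he, hg]
        ring
      · have hpf : (q.1 == 1 && decide (0 ≤ q.2) && decide (q.2 < m) && (q.2.toNat == k)) = false := by
          simp [he]
        simp [he, hpf]
    · rw [Bool.not_eq_true] at hg
      rw [if_neg (by simp [hg])]
      have hpf : (q.1 == 1 && decide (0 ≤ q.2) && decide (q.2 < m) && (q.2.toNat == k)) = false := by
        rw [hg]; simp
      rw [ih counts k hk hm, hpf]
      simp
  
-- zip(row, assignment) is the indexed view over range n
theorem pvZipEqMapRange (row assignment : List Int) (n : Nat)
    (ha : assignment.length = n) (hr : n ≤ row.length) :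
    row.zip assignment = (List.range n).map (fun j => (row.getD j 0, assignment.getD j 0)) := by
  apply List.ext_getElem
  · simp [List.length_zip, ha]; omega
  · intro i h1 h2
    have hi : i < n := by simpa using h2
    simp only [List.getElem_zip, List.getElem_map, List.getElem_range]
    rw [List.getD_eq_getElem _ _ (show i < row.length by omega),
        List.getD_eq_getElem _ _ (show i < assignment.length by omega)]

-- the tally predicate agrees with A's per-color predicate for 0 ≤ c < m
theorem pvPredEq (m c : Int) (hc0 : 0 ≤ c) (hcm : c < m) (q : Int × Int) :
    (q.1 == 1 && decide (0 ≤ q.2) && decide (q.2 < m) && (q.2.toNat == c.toNat))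
    = (q.1 == 1 && q.2 == c) := by
  rcases q with ⟨e, a⟩
  by_cases h4 : a = c
  · subst h4; simp [hc0, hcm]
  · have t1 : (a == c) = false := by simp [h4]
    have t2 : (decide (0 ≤ a) && decide (a < m) && (a.toNat == c.toNat)) = false := by
      by_cases h2 : 0 ≤ a
      · have hb : (a.toNat == c.toNat) = false := by simp; omega
        simp [hb]
      · simp [h2]
    simp only [Bool.and_assoc] at t2 ⊢
    rw [t1, t2]

-- key equality per node: A's conflict count for color c equals B's tally cell
theorem pvKeyEq (m : Int) (row assignment : List Int) (n : Nat)
    (ha : assignment.length = n) (hr : n ≤ row.length)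
    (c : Int) (hc0 : 0 ≤ c) (hcm : c < m) :
    (List.range n).foldl (fun cc neighbor =>
        if (row.getD neighbor 0 == 1 && assignment.getD neighbor 0 == c) then cc + 1 else cc) 0
    = ((row.zip assignment).foldl (fun cnts (q : Int × Int) =>
        if (q.1 == 1 && decide (0 ≤ q.2) && decide (q.2 < m))
        then cnts.set q.2.toNat (cnts.getD q.2.toNat 0 + 1) else cnts)
        (List.replicate m.toNat (0 : Int))).getD c.toNat 0 := by
  have hck : c.toNat < m.toNat := by omega
  rw [pvTallyGetD m (row.zip assignment) (List.replicate m.toNat (0 : Int)) c.toNat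
      (by simpa using hck) (by simp)]
  rw [List.getD_eq_getElem _ _ (by simpa using hck)]
  simp only [List.getElem_replicate, zero_add]
  rw [PySem.List.foldl_count_if (fun j => row.getD j 0 == 1 && assignment.getD j 0 == c)]
  rw [zero_add]
  rw [pvZipEqMapRange row assignment n ha hr, List.countP_map]
  congr 1
  refine List.countP_congr ?_
  intro j _
  have hpe := pvPredEq m c hc0 hcm (row.getD j 0, assignment.getD j 0)
  simp only [Function.comp] at hpe ⊢
  rw [hpe]

-- ===== VERDICT (by name: the statement is the Claim_ definition above) =====
theorem force_assign_with_conflicts_spec : Claim_equal_force_assign_with_conflicts := by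
  intro graph m steps _ hpre
  unfold Spec_force_assign_with_conflicts
  unfold force_assign_with_conflicts force_assign_with_conflicts_alt
  rw [PySem.List.enumerate_eq_map_pyRange graph ([] : List Int), PySem.List.len_eq,
      PySem.List.pyRange_zero_nat, List.foldl_map, List.foldl_map]
  apply Eq.symm
  apply pvFoldlInvCongr (List.range graph.length) _ _
    (fun assignment => assignment.length = graph.length)
  · intro assignment node hnode hlen
    have hn : node < graph.length := List.mem_range.mp hnode
    simp only [PySem.List.pyGetD_natCast, PySem.List.pySetD_natCast]
    congr 1
    rw [pvArgminEq m]
    apply pvMinDCongr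
    intro c hc
    have hcr : 0 ≤ c ∧ c < m := by
      have := (PySem.List.mem_pyRange_one).mp hc; omega
    have hrow : graph.getD node [] ∈ graph := by
      rw [List.getD_eq_getElem _ _ hn]; exact List.getElem_mem hn
    have hr : graph.length ≤ (graph.getD node []).length := by
      rcases hpre with h | h
      · omega
      · exact h _ hrow
    exact (pvKeyEq m (graph.getD node []) assignment graph.length hlen hr c hcr.1 hcr.2).symm
  · intro assignment node hnode hlen
    simpa using hlen
  · simp
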